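-- pv_equiv track=rewrite | github.com/VirajPatidar/Basic-Algorithms | Internet & Network Security/RowTransposition_cipher.py | make_mat
-- ===== SOURCE A (Python) =====
-- def make_mat(text, key):
--     text = text.replace(' ', '')
--     matrix = []
--     row = []
--     count = 0
--
--     for char in text:
--         row.append(char)
--         count += 1
--
--         if count % len(key) == 0:
--             matrix.append(row)
--             row = []
--
--     if len(text) % len(key) != 0:
--         while len(row) != len(key):
--             row.append('X')
--         matrix.append(row)
--
--     return matrix
-- ===== SOURCE B (Python) =====
-- def make_mat(text, key):
--     text = text.replace(' ', '')
--     k = len(key)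
--     while len(text) % k != 0:   # raises ZeroDivisionError for empty key, like A
--         text += 'X'
--     def chunks(s):
--         if not s:
--             return []
--         return [list(s[:k])] + chunks(s[k:])
--     return chunks(text)
-- ===== Notes on version B (the rewrite author's own statement) =====
-- stated objective: simpler
-- what changed: Pads the stripped string itself to a multiple of the key length and then chunks it by slicing recursion, instead of A's character-by-character counter/flush accumulator loop with a separate row-padding while loop.
import Mathlib
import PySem

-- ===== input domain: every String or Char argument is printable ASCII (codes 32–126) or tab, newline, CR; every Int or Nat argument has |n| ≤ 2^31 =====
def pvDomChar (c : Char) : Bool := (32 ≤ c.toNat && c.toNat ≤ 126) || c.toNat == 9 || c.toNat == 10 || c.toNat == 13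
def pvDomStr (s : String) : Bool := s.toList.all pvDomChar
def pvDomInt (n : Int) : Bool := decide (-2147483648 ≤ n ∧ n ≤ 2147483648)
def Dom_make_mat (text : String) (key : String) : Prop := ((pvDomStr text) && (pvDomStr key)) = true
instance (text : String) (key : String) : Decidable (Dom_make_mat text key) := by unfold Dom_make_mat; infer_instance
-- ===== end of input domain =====

-- B pads the stripped string to a multiple of the key length and chunks it by slicing
-- recursion, replacing A's counter/flush accumulator loop (objective: simpler).


-- (n+1) % k in terms of n % k; termination helper for the padding loops, cited by name below.
theorem pvSuccMod (k n : Nat) : (n + 1) % k = (n % k + 1) % k := by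
  conv_lhs => rw [← Nat.mod_add_mod]

theorem pvPadDec (k n : Nat) (hk : k ≠ 0) (h : n % k ≠ 0) :
    (k - (n + 1) % k) % k < (k - n % k) % k := by
  have h1 : n % k < k := Nat.mod_lt _ (Nat.pos_of_ne_zero hk)
  have h2 := pvSuccMod k n
  by_cases he : n % k + 1 = k
  · rw [he, Nat.mod_self] at h2
    rw [h2, Nat.sub_zero, Nat.mod_self, Nat.mod_eq_of_lt (show k - n % k < k by omega)]
    omega
  · rw [Nat.mod_eq_of_lt (show n % k + 1 < k by omega)] at h2
    rw [h2, Nat.mod_eq_of_lt (show k - (n % k + 1) < k by omega),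
      Nat.mod_eq_of_lt (show k - n % k < k by omega)]
    omega

-- ===== PORT A =====
-- while len(row) != len(key): row.append('X')  — Python's loop condition is '≠'; the loop is
-- entered only with row shorter than key, so the '<' guard here only makes the recursion total
-- (for row longer than key Python would diverge, which is unreachable).
def padRowA (k : Nat) (row : List String) : List String :=
  if h : row.length < k then padRowA k (row ++ ["X"]) else row
termination_by k - row.length
decreasing_by simp; omega

-- 'len(key)' is key.toList.length (Python len of an ASCII string; counts are Nat since Python's
-- count starts at 0 and only increments, and Python's % equals Nat.mod on nonnegatives).
def make_mat (text : String) (key : String) : List (List String) :=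
  let t := (PySem.Str.replace text " " "").toList
  let st := t.foldl
    (fun (s : List (List String) × List String × Nat) char =>
      let row := s.2.1 ++ [String.ofList [char]]
      let count := s.2.2 + 1
      if count % key.toList.length = 0 then (s.1 ++ [row], [], count)
      else (s.1, row, count))
    ([], [], 0)
  if t.length % key.toList.length ≠ 0 then st.1 ++ [padRowA key.toList.length st.2.1]
  else st.1

-- ===== PORT B =====
-- while len(text) % k != 0: text += 'X'  — the 'k ≠ 0' guard only makes the recursion total
-- (Python raises ZeroDivisionError there, excluded by Pre_).
def padXB (k : Nat) (s : List Char) : List Char :=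
  if h : k ≠ 0 ∧ s.length % k ≠ 0 then padXB k (s ++ ['X']) else s
termination_by (k - s.length % k) % k
decreasing_by
  rw [show (s ++ ['X']).length = s.length + 1 from by simp]
  exact pvPadDec k s.length h.1 h.2

-- def chunks(s): if not s: return [] ; return [list(s[:k])] + chunks(s[k:])
-- s[:k] and s[k:] are the Python slices, ported with PySem.List.slice.
def chunksB (k : Nat) (s : List Char) : List (List String) :=
  if h : s = [] ∨ k = 0 then []  -- k = 0 guard for totality only: Python raised before reaching chunks
  else ((PySem.List.slice s none (some (k : Int))).map (fun c => String.ofList [c]))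
       :: chunksB k (PySem.List.slice s (some (k : Int)) none)
termination_by s.length
decreasing_by
  rw [PySem.List.slice_from_natCast]
  push_neg at h
  have h1 : s.length ≠ 0 := fun hc => h.1 (List.eq_nil_of_length_eq_zero hc)
  simp
  omega

def make_mat_alt (text : String) (key : String) : List (List String) :=
  let t := (PySem.Str.replace text " " "").toList
  let k := key.toList.length
  chunksB k (padXB k t)

-- ===== PRECONDITION & SPEC =====
-- A evaluates 'count % len(key)' / 'len(text) % len(key)': an empty key raises ZeroDivisionError
-- (in B likewise at 'len(text) % k'), so empty keys are excluded.
def Pre_make_mat (text : String) (key : String) : Prop := key ≠ ""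
instance (text : String) (key : String) : Decidable (Pre_make_mat text key) := by
  unfold Pre_make_mat; infer_instance

def pvWitness_make_mat : String × String := ("ATTACK AT DAWN", "key")

def Spec_make_mat (text : String) (key : String) (out : List (List String)) : Prop := out = make_mat_alt text key
instance (text : String) (key : String) (out : List (List String)) : Decidable (Spec_make_mat text key out) := by unfold Spec_make_mat; infer_instance

-- ===== CLAIM (what is proved, stated in full; the proofs are below) =====
def Claim_equal_make_mat : Prop := ∀ (text : String) (key : String), Dom_make_mat text key → Pre_make_mat text key → Spec_make_mat text key (make_mat text key)

-- ===== LEMMAS AND PROOFS =====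

-- Proof-side characterisation of A's fold result: the full chunks F and the trailing partial row R.
def chunkF (k : Nat) (l : List Char) : List (List String) :=
  if h : k ≠ 0 ∧ k ≤ l.length then
    ((l.take k).map (fun c => String.ofList [c])) :: chunkF k (l.drop k)
  else []
termination_by l.length
decreasing_by simp; omega

def chunkR (k : Nat) (l : List Char) : List String :=
  if h : k ≠ 0 ∧ k ≤ l.length then chunkR k (l.drop k)
  else l.map (fun c => String.ofList [c])
termination_by l.length
decreasing_by simp; omega

theorem padRowA_eq (k : Nat) (r : List String) (h : r.length ≤ k) :
    padRowA k r = r ++ List.replicate (k - r.length) "X" := by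
  by_cases hlt : r.length < k
  · rw [padRowA, dif_pos hlt, padRowA_eq k _ (by simp; omega),
      show (r ++ ["X"]).length = r.length + 1 from by simp, List.append_assoc]
    congr 1
    rw [show k - r.length = (k - (r.length + 1)) + 1 from by omega, List.replicate_succ]
    rfl
  · rw [padRowA, dif_neg hlt]
    have : k - r.length = 0 := by omega
    simp [this]
termination_by k - r.length
decreasing_by simp; omega

theorem padXB_eq (k : Nat) (s : List Char) (hk : k ≠ 0) :
    padXB k s = s ++ List.replicate ((k - s.length % k) % k) 'X' := by
  by_cases h : s.length % k = 0
  · rw [padXB, dif_neg (by simp [h]), h, Nat.sub_zero, Nat.mod_self]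
    simp
  · have h1 : s.length % k < k := Nat.mod_lt _ (Nat.pos_of_ne_zero hk)
    have h2 := pvSuccMod k s.length
    have hlen : (s ++ ['X']).length = s.length + 1 := by simp
    rw [padXB, dif_pos ⟨hk, h⟩, padXB_eq k _ hk, hlen]
    by_cases he : s.length % k + 1 = k
    · rw [he, Nat.mod_self] at h2
      rw [h2, Nat.sub_zero, Nat.mod_self]
      have e1 : (k - s.length % k) % k = 1 := by
        rw [Nat.mod_eq_of_lt (by omega)]; omega
      simp [e1]
    · rw [Nat.mod_eq_of_lt (show s.length % k + 1 < k by omega)] at h2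
      rw [h2]
      have e1 : (k - (s.length % k + 1)) % k = k - s.length % k - 1 :=
        Nat.mod_eq_of_lt (by omega)
      have e2 : (k - s.length % k) % k = k - s.length % k :=
        Nat.mod_eq_of_lt (by omega)
      rw [e1, e2, List.append_assoc]
      congr 1
      rw [show k - s.length % k = (k - s.length % k - 1) + 1 from by omega,
        List.replicate_succ]
      rfl
termination_by (k - s.length % k) % k
decreasing_by
  rw [show (s ++ ['X']).length = s.length + 1 from by simp]
  exact pvPadDec k s.length hk h

theorem chunksB_nil (k : Nat) : chunksB k [] = [] := by
  rw [chunksB]; simp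

theorem chunksB_cons (k : Nat) (s : List Char) (hk : k ≠ 0) (hs : s ≠ []) :
    chunksB k s = ((s.take k).map (fun c => String.ofList [c])) :: chunksB k (s.drop k) := by
  rw [chunksB, dif_neg (by simp [hk, hs])]
  rw [PySem.List.slice_from_natCast, PySem.List.slice_to_natCast]

-- A's fold never flushes while the current chunk is incomplete.
theorem fold_no_flush (k : Nat) (p : List Char) :
    ∀ (M : List (List String)) (r : List String) (c : Nat),
    c % k = r.length → r.length + p.length < k →
    p.foldl
      (fun (s : List (List String) × List String × Nat) char =>
        let row := s.2.1 ++ [String.ofList [char]]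
        let count := s.2.2 + 1
        if count % k = 0 then (s.1 ++ [row], [], count)
        else (s.1, row, count))
      (M, r, c)
    = (M, r ++ p.map (fun char => String.ofList [char]), c + p.length) := by
  induction p with
  | nil => intro M r c _ _; simp
  | cons a p ih =>
    intro M r c hc hlt
    simp only [List.foldl_cons, List.length_cons] at *
    have hr1 : r.length + 1 < k := by omega
    have hmod : (c + 1) % k = r.length + 1 := by
      rw [pvSuccMod, hc, Nat.mod_eq_of_lt hr1]
    rw [if_neg (by omega)]
    rw [ih M (r ++ [String.ofList [a]]) (c + 1) (by simp [hmod]) (by simp; omega)]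
    simp
    omega

-- A's fold from a flushed state computes the full chunks and the trailing partial row.
theorem foldA_eq (k : Nat) (hk : k ≠ 0) (l : List Char) :
    ∀ (M : List (List String)) (c : Nat), c % k = 0 →
    l.foldl
      (fun (s : List (List String) × List String × Nat) char =>
        let row := s.2.1 ++ [String.ofList [char]]
        let count := s.2.2 + 1
        if count % k = 0 then (s.1 ++ [row], [], count)
        else (s.1, row, count))
      (M, [], c)
    = (M ++ chunkF k l, chunkR k l, c + l.length) := by
  intro M c hc
  by_cases hlen : k ≤ l.length
  · -- one full chunk, then recurse
    have h0 : l.take k ≠ [] := by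
      have : (l.take k).length = k := by simp; omega
      intro hc'; rw [hc'] at this; simp at this; omega
    have hsplit : ((l.take k).dropLast ++ [(l.take k).getLast h0]) ++ l.drop k = l := by
      rw [List.dropLast_append_getLast h0, List.take_append_drop]
    have hdl : (l.take k).dropLast.length = k - 1 := by simp; omega
    conv_lhs => rw [← hsplit]
    rw [List.foldl_append, List.foldl_append]
    rw [fold_no_flush k _ M [] c (by simpa using hc) (by simp [hdl]; omega)]
    simp only [List.foldl_cons, List.foldl_nil, List.nil_append]
    have hcnt : c + (l.take k).dropLast.length + 1 = c + k := by rw [hdl]; omega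
    rw [hcnt, if_pos (by rw [Nat.add_mod_right]; exact hc)]
    have hrow : (l.take k).dropLast.map (fun char => String.ofList [char])
        ++ [String.ofList [(l.take k).getLast h0]] = (l.take k).map (fun char => String.ofList [char]) := by
      rw [show [String.ofList [(l.take k).getLast h0]]
          = List.map (fun char => String.ofList [char]) [(l.take k).getLast h0] from rfl,
        ← List.map_append, List.dropLast_append_getLast h0]
    rw [hrow, foldA_eq k hk (l.drop k) (M ++ [(l.take k).map (fun char => String.ofList [char])]) (c + k) (by rw [Nat.add_mod_right]; exact hc)]
    have hF : chunkF k l = ((l.take k).map (fun char => String.ofList [char])) :: chunkF k (l.drop k) := by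
      rw [chunkF, dif_pos ⟨hk, hlen⟩]
    have hR : chunkR k l = chunkR k (l.drop k) := by
      rw [chunkR, dif_pos ⟨hk, hlen⟩]
    rw [hF, hR]
    simp
    omega
  · rw [fold_no_flush k l M [] c (by simpa using hc) (by simp; omega)]
    rw [chunkF, dif_neg (by omega), chunkR, dif_neg (by omega)]
    simp
termination_by l.length
decreasing_by simp; omega

-- Core: A's finishing step applied to (F, R) equals B's pad-then-chunk.
theorem finish_eq (k : Nat) (hk : k ≠ 0) (l : List Char) :
    (if l.length % k ≠ 0 then chunkF k l ++ [padRowA k (chunkR k l)] else chunkF k l)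
      = chunksB k (padXB k l) := by
  by_cases hlen : k ≤ l.length
  · -- peel one full chunk off both sides
    have htk : (l.take k).length = k := by simp; omega
    have hA : chunkF k l = ((l.take k).map (fun c => String.ofList [c])) :: chunkF k (l.drop k) := by
      rw [chunkF, dif_pos ⟨hk, hlen⟩]
    have hR : chunkR k l = chunkR k (l.drop k) := by
      rw [chunkR, dif_pos ⟨hk, hlen⟩]
    have hmod : l.length % k = (l.drop k).length % k := by
      have hdl : (l.drop k).length = l.length - k := by simp
      rw [show l.length = (l.drop k).length + k from by omega, Nat.add_mod_right]
    have hpad : padXB k l = l.take k ++ padXB k (l.drop k) := by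
      rw [padXB_eq k l hk, padXB_eq k (l.drop k) hk, ← hmod, ← List.append_assoc,
        List.take_append_drop]
    rw [hpad]
    have hne : l.take k ++ padXB k (l.drop k) ≠ [] := by
      intro hcon
      have h3 := congrArg List.length hcon
      rw [List.length_append, htk] at h3
      simp at h3
      omega
    rw [chunksB_cons k _ hk hne]
    have h1 : (l.take k ++ padXB k (l.drop k)).take k = l.take k :=
      List.take_left' htk
    have h2 : (l.take k ++ padXB k (l.drop k)).drop k = padXB k (l.drop k) :=
      List.drop_left' htk
    rw [h1, h2, ← finish_eq k hk (l.drop k), hA, hR, hmod]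
    split_ifs <;> simp
  · -- l shorter than k: at most one (padded) row
    push_neg at hlen
    by_cases hnil : l = []
    · subst hnil
      rw [chunkF, dif_neg (by simp), chunkR, dif_neg (by simp)]
      rw [padXB, dif_neg (by simp)]
      simp [chunksB_nil]
    · have hpos : 0 < l.length := List.length_pos_of_ne_nil hnil
      have hmod : l.length % k = l.length := Nat.mod_eq_of_lt hlen
      have hF : chunkF k l = [] := by rw [chunkF, dif_neg (by omega)]
      have hR : chunkR k l = l.map (fun c => String.ofList [c]) := by
        rw [chunkR, dif_neg (by omega)]
      have hpad : padXB k l = l ++ List.replicate (k - l.length) 'X' := by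
        rw [padXB_eq k l hk, hmod, Nat.mod_eq_of_lt (show k - l.length < k by omega)]
      have hpl : (padXB k l).length = k := by rw [hpad]; simp; omega
      have hne : padXB k l ≠ [] := by
        intro hcon; rw [hcon] at hpl; simp at hpl; omega
      rw [chunksB_cons k _ hk hne, List.take_of_length_le (by omega),
        List.drop_of_length_le (by omega), chunksB_nil, hpad, hF, hR]
      rw [if_pos (by omega), padRowA_eq k _ (by simp; omega)]
      simp
termination_by l.length
decreasing_by all_goals simp; omega

-- ===== VERDICT (by name: the statement is the Claim_ definition above) =====
theorem make_mat_spec : Claim_equal_make_mat := by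
  intro text key _ hpre
  unfold Spec_make_mat make_mat make_mat_alt
  have hk : key.toList.length ≠ 0 := by
    intro h
    rw [List.length_eq_zero_iff, String.toList_eq_nil_iff] at h
    exact hpre h
  simp only
  rw [foldA_eq key.toList.length hk _ [] 0 (by simp)]
  simp only [List.nil_append]
  exact finish_eq key.toList.length hk _
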